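-- pv_equiv track=rewrite | github.com/bookbot-hive/babygruut | g2p_alignment/utils.py | insert_punctuation
-- ===== SOURCE A (Python) =====
-- import string
--
-- def insert_punctuation(original_word, syllable_word):
--     # Define what we consider punctuation.
--     # Here, let's treat anything that is not a letter or a dot as punctuation.
--     punctuation_chars = set(ch for ch in original_word if ch not in string.ascii_letters and ch != '.')
--
--     # Step 1: Identify the letter positions in the original word and record punctuation placement.
--     letter_count = 0
--     punctuation_map = {}  # key: letter index (0-based), value: list of punctuation marks after that letter
--
--     for i, ch in enumerate(original_word):
--         if ch in string.ascii_letters: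
--             # We've encountered a letter, increase the count
--             letter_count += 1
--         elif ch in punctuation_chars:
--             # Punctuation appears after the last encountered letter
--             # If we have no letters yet and punctuation occurs, place it at -1 index
--             # meaning it goes before the first letter in the syllable version.
--             insert_index = letter_count - 1
--             punctuation_map.setdefault(insert_index, []).append(ch)
--
--     # Step 2: Insert punctuation into the syllable_word at corresponding positions.
--     # We'll build a new string from the syllable_word.
--     result = []
--     letter_count = 0
--     for ch in syllable_word:
--         result.append(ch)
--         if ch in string.ascii_letters:
--             # After adding this letter, check if we have punctuation to insert
--             if (letter_count in punctuation_map):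
--                 # Insert all punctuation for this letter index
--                 for pch in punctuation_map[letter_count]:
--                     result.append(pch)
--             letter_count += 1
--
--     return "".join(result)
-- ===== SOURCE B (Python) =====
-- import string
--
--
-- def insert_punctuation(original_word, syllable_word):
--     # Single two-pointer merge: walk syllable_word, and keep the unconsumed
--     # suffix `rest` of original_word.  Each time a letter is emitted, drop any
--     # non-letters still in front of `rest` (leading punctuation is discarded),
--     # consume the matching letter, then copy every following non-dot,
--     # non-letter character straight into the output, stopping at the next
--     # letter.  No punctuation map is ever built.
--     letters = string.ascii_letters
--     rest = original_word
--     out = []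
--     for ch in syllable_word:
--         out.append(ch)
--         if ch in letters:
--             while rest and rest[0] not in letters:
--                 rest = rest[1:]          # drop unconsumed non-letters
--             if rest:
--                 rest = rest[1:]          # consume the matching letter
--             while rest and rest[0] not in letters:
--                 if rest[0] != '.':
--                     out.append(rest[0])  # copy trailing punctuation
--                 rest = rest[1:]
--     return "".join(out)
-- ===== Notes on version B (the rewrite author's own statement) =====
-- stated objective: simpler
-- what changed: Replaced the two-phase build-a-punctuation-dict-then-replay structure with a single two-pointer merge that keeps only the unconsumed suffix of original_word and copies trailing punctuation directly while emitting syllable_word.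
import Mathlib
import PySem

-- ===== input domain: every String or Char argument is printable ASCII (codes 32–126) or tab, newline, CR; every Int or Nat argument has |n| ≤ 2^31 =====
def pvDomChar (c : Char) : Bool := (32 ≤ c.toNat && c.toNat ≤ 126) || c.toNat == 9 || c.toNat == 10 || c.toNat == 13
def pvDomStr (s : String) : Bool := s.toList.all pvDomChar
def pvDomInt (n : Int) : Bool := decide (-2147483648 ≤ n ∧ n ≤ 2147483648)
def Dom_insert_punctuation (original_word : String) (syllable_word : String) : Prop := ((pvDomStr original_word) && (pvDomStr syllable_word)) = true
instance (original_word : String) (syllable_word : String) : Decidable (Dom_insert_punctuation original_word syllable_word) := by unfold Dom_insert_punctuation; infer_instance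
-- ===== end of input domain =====

-- B replaces A's build-a-dict-then-replay structure by a single two-pointer merge on the
-- unconsumed suffix of original_word (objective: simpler; same return value everywhere).

-- ===== PORT A =====
-- ch in string.ascii_letters (a single char is in the 'a..zA..Z' string iff it is an ASCII letter)
def pvIsLetter (c : Char) : Bool := ('a' ≤ c && c ≤ 'z') || ('A' ≤ c && c ≤ 'Z')

-- punctuation_chars = set(ch for ch in original_word if ch not in string.ascii_letters and ch != '.')
def pvPunctChars (o : List Char) : PySem.Set Char :=
  PySem.Set.ofList (o.filter (fun c => !pvIsLetter c && c != '.'))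

-- the step-1 loop: state = (letter_count, punctuation_map); setdefault(k, []).append(ch) is modify k [] (· ++ [ch])
def pvBuildMap (ps : PySem.Set Char) : List Char → Int → PySem.Dict Int (List Char) → PySem.Dict Int (List Char)
  | [], _, d => d
  | ch :: cs, lc, d =>
    if pvIsLetter ch then pvBuildMap ps cs (lc + 1) d
    else if ps.contains ch then pvBuildMap ps cs lc (d.modify (lc - 1) [] (· ++ [ch]))
    else pvBuildMap ps cs lc d

-- the step-2 loop: append ch; if letter, append map[letter_count] when present, then letter_count += 1
def pvGoA (d : PySem.Dict Int (List Char)) : List Char → Int → List Char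
  | [], _ => []
  | ch :: s, lc =>
    ch :: (if pvIsLetter ch then
             (if d.contains lc then d.getD lc [] else []) ++ pvGoA d s (lc + 1)
           else pvGoA d s lc)

def insert_punctuation (original_word : String) (syllable_word : String) : String :=
  let ps := pvPunctChars original_word.toList
  let m := pvBuildMap ps original_word.toList 0 PySem.Dict.empty
  String.ofList (pvGoA m syllable_word.toList 0)

-- ===== PORT B =====
-- first while loop of Source B: drop leading non-letters of rest
def pvDropPre : List Char → List Char
  | [] => []
  | c :: cs => if pvIsLetter c then c :: cs else pvDropPre cs

-- second while loop of Source B: (characters copied to out, remaining rest)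
def pvCollect : List Char → List Char × List Char
  | [] => ([], [])
  | c :: cs =>
    if pvIsLetter c then ([], c :: cs)
    else
      let (p, r) := pvCollect cs
      (if c != '.' then c :: p else p, r)

-- the for loop of Source B: state = unconsumed suffix `rest` of original_word
def pvGoB : List Char → List Char → List Char
  | _, [] => []
  | rest, ch :: s =>
    if pvIsLetter ch then
      let r1 := pvDropPre rest
      let r2 := r1.tail            -- `if rest: rest = rest[1:]` (tail [] = [])
      let pr := pvCollect r2
      ch :: (pr.1 ++ pvGoB pr.2 s)
    else ch :: pvGoB rest s

def insert_punctuation_alt (original_word : String) (syllable_word : String) : String :=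
  String.ofList (pvGoB original_word.toList syllable_word.toList)

-- ===== PRECONDITION & SPEC =====
def Spec_insert_punctuation (original_word : String) (syllable_word : String) (out : String) : Prop := out = insert_punctuation_alt original_word syllable_word
instance (original_word : String) (syllable_word : String) (out : String) : Decidable (Spec_insert_punctuation original_word syllable_word out) := by unfold Spec_insert_punctuation; infer_instance

-- ===== CLAIM (what is proved, stated in full; the proofs are below) =====
def Claim_equal_insert_punctuation : Prop := ∀ (original_word : String) (syllable_word : String), Dom_insert_punctuation original_word syllable_word → Spec_insert_punctuation original_word syllable_word (insert_punctuation original_word syllable_word)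

-- ===== LEMMAS AND PROOFS =====

-- spec-side helpers: sufAt l c = suffix of l starting at its c-th letter ([] if none);
-- pchunk l j = the non-dot punctuation run after the j-th letter of l (j = 0: before the first letter)
def sufAt : List Char → Nat → List Char
  | [], _ => []
  | ch :: cs, c =>
    if pvIsLetter ch then (match c with | 0 => ch :: cs | c' + 1 => sufAt cs c') else sufAt cs c

def pchunk : List Char → Nat → List Char
  | [], _ => []
  | ch :: cs, j =>
    if pvIsLetter ch then (match j with | 0 => [] | j' + 1 => pchunk cs j')
    else match j with
      | 0 => if ch != '.' then ch :: pchunk cs 0 else pchunk cs 0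
      | j' + 1 => pchunk cs (j' + 1)

-- the common shape both loops compute, relative to a fixed original list L
def specGo (L : List Char) : List Char → Nat → List Char
  | [], _ => []
  | ch :: s, c =>
    if pvIsLetter ch then ch :: (pchunk L (c + 1) ++ specGo L s (c + 1)) else ch :: specGo L s c

-- the (key, char) pairs A's step-1 loop feeds to setdefault/append
def pairsF : List Char → Int → List (Int × Char)
  | [], _ => []
  | ch :: cs, lc =>
    if pvIsLetter ch then pairsF cs (lc + 1)
    else if !pvIsLetter ch && ch != '.' then (lc - 1, ch) :: pairsF cs lc
    else pairsF cs lc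

lemma buildMap_eq_foldl (ps : PySem.Set Char) (cs : List Char)
    (h : ∀ ch ∈ cs, ps.contains ch = (!pvIsLetter ch && ch != '.')) :
    ∀ (lc : Int) (d : PySem.Dict Int (List Char)),
      pvBuildMap ps cs lc d =
        (pairsF cs lc).foldl (fun d p => d.modify p.1 [] (· ++ [p.2])) d := by
  induction cs with
  | nil => intro lc d; simp [pvBuildMap, pairsF]
  | cons ch cs ih =>
    intro lc d
    have hch := h ch (List.mem_cons_self)
    have hrest : ∀ c ∈ cs, ps.contains c = (!pvIsLetter c && c != '.') := fun c hc =>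
      h c (List.mem_cons_of_mem _ hc)
    by_cases hl : pvIsLetter ch
    · simp [pvBuildMap, pairsF, hl, ih hrest]
    · by_cases hd : (ch != '.') = true
      · simp only [pvBuildMap, pairsF, hch]
        simp [hl, hd, ih hrest]
      · simp only [pvBuildMap, pairsF, hch]
        simp [hl, hd, ih hrest]

lemma contains_punctChars (L : List Char) (ch : Char) (h : ch ∈ L) :
    (pvPunctChars L).contains ch = (!pvIsLetter ch && ch != '.') := by
  by_cases hp : (!pvIsLetter ch && ch != '.') = true
  · rw [hp]
    have : ch ∈ pvPunctChars L := by
      unfold pvPunctChars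
      rw [PySem.Set.mem_ofList]
      exact List.mem_filter.2 ⟨h, hp⟩
    simpa [List.contains_iff_mem]
  · rw [Bool.not_eq_true] at hp
    rw [hp]
    have : ch ∉ pvPunctChars L := by
      unfold pvPunctChars
      rw [PySem.Set.mem_ofList]
      intro hmem
      exact absurd (List.mem_filter.1 hmem).2 (by simp [hp])
    simpa [List.contains_iff_mem]

lemma filter_pairsF (cs : List Char) :
    ∀ (lc k : Int),
      ((pairsF cs lc).filter (fun p => p.1 == k)).map (·.2) =
        if lc - 1 ≤ k then pchunk cs (k - (lc - 1)).toNat else [] := by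
  induction cs with
  | nil => intro lc k; simp [pairsF, pchunk]
  | cons ch cs ih =>
    intro lc k
    by_cases hl : pvIsLetter ch
    · rw [pairsF, if_pos hl, ih (lc + 1) k]
      by_cases hk : lc - 1 ≤ k
      · by_cases hk2 : lc ≤ k
        · have h1 : (k - (lc - 1)).toNat = (k - lc).toNat + 1 := by omega
          rw [if_pos hk, if_pos (by omega : lc + 1 - 1 ≤ k), h1, pchunk, if_pos hl]
          congr 1
          omega
        · have hke : k = lc - 1 := by omega
          have h0 : (k - (lc - 1)).toNat = 0 := by omega
          rw [if_pos hk, if_neg (by omega : ¬ lc + 1 - 1 ≤ k), h0, pchunk, if_pos hl]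
      · rw [if_neg hk, if_neg (by omega : ¬ lc + 1 - 1 ≤ k)]
    · by_cases hd : (ch != '.') = true
      · rw [pairsF, if_neg hl, if_pos (by simp [hl, hd])]
        by_cases hke : lc - 1 = k
        · have h0 : (k - (lc - 1)).toNat = 0 := by omega
          rw [List.filter_cons_of_pos (by simpa using hke), List.map_cons,
            ih lc k, if_pos (by omega), h0, pchunk, if_neg hl]
          simp [hd, hke]
        · rw [List.filter_cons_of_neg (by simpa using hke), ih lc k]
          by_cases hk : lc - 1 ≤ k
          · have h1 : (k - (lc - 1)).toNat = (k - lc).toNat + 1 := by omega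
            rw [if_pos hk, if_pos hk, h1, pchunk, if_neg hl]
          · rw [if_neg hk, if_neg hk]
      · simp only [bne, Bool.not_eq_true'] at hd
        have hdot : ch = '.' := by simpa using hd
        rw [pairsF, if_neg hl, if_neg (by simp [hdot]), ih lc k]
        by_cases hk : lc - 1 ≤ k
        · rw [if_pos hk, if_pos hk]
          by_cases h0 : (k - (lc - 1)).toNat = 0
          · rw [h0, pchunk, if_neg hl]
            simp [hdot]
          · obtain ⟨j, hj⟩ : ∃ j, (k - (lc - 1)).toNat = j + 1 := ⟨_, (Nat.succ_pred_eq_of_pos (Nat.pos_of_ne_zero h0)).symm⟩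
            rw [hj, pchunk, if_neg hl]
        · rw [if_neg hk, if_neg hk]

lemma getD_buildMap (L : List Char) (c : Nat) :
    (pvBuildMap (pvPunctChars L) L 0 PySem.Dict.empty).getD (c : Int) [] = pchunk L (c + 1) := by
  rw [buildMap_eq_foldl _ _ (fun ch hch => contains_punctChars L ch hch),
    PySem.Dict.getD_foldl_modify_append, PySem.Dict.getD_empty, filter_pairsF,
    if_pos (by omega : (0:Int) - 1 ≤ (c:Int))]
  have : ((c:Int) - ((0:Int) - 1)).toNat = c + 1 := by omega
  rw [this]
  simp

lemma goA_eq_specGo (L : List Char) (m : PySem.Dict Int (List Char))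
    (hm : ∀ c : Nat, m.getD (c : Int) [] = pchunk L (c + 1)) :
    ∀ (s : List Char) (c : Nat), pvGoA m s (c : Int) = specGo L s c := by
  intro s
  induction s with
  | nil => intro c; simp [pvGoA, specGo]
  | cons ch s ih =>
    intro c
    by_cases h : pvIsLetter ch
    · have hc : (c : Int) + 1 = ((c + 1 : Nat) : Int) := by push_cast; ring
      by_cases hm' : m.contains (c : Int)
      · simp only [pvGoA, specGo, h, if_pos, hm', hc, ih (c + 1), hm c]
      · have : m.getD (c : Int) [] = [] :=
          PySem.Dict.getD_of_not_contains m [] (by simpa using hm')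
        simp only [pvGoA, specGo, h, if_pos, hm', hc, ih (c + 1)]
        rw [← hm c, this]
        simp
    · simp only [pvGoA, specGo, h]
      simp [ih c]

lemma dropPre_dropPre (xs : List Char) : pvDropPre (pvDropPre xs) = pvDropPre xs := by
  induction xs with
  | nil => simp [pvDropPre]
  | cons c cs ih =>
    by_cases h : pvIsLetter c
    · simp [pvDropPre, h]
    · simp [pvDropPre, h, ih]

lemma collect_snd (xs : List Char) : (pvCollect xs).2 = pvDropPre xs := by
  induction xs with
  | nil => simp [pvCollect, pvDropPre]
  | cons c cs ih =>
    by_cases h : pvIsLetter c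
    · simp [pvCollect, pvDropPre, h]
    · simp [pvCollect, pvDropPre, h, ih]

lemma collect_fst (xs : List Char) : (pvCollect xs).1 = pchunk xs 0 := by
  induction xs with
  | nil => simp [pvCollect, pchunk]
  | cons c cs ih =>
    by_cases h : pvIsLetter c
    · simp [pvCollect, pchunk, h]
    · by_cases hd : c = '.'
      · subst hd
        simp [pvCollect, pchunk, ih, show pvIsLetter '.' = false from by decide]
      · simp [pvCollect, pchunk, h, hd, ih]

lemma dropPre_eq_sufAt_zero (xs : List Char) : pvDropPre xs = sufAt xs 0 := by
  induction xs with
  | nil => simp [pvDropPre, sufAt]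
  | cons c cs ih =>
    by_cases h : pvIsLetter c
    · simp [pvDropPre, sufAt, h]
    · simp [pvDropPre, sufAt, h, ih]

lemma dropPre_tail_sufAt (L : List Char) : ∀ c, pvDropPre ((sufAt L c).tail) = sufAt L (c + 1) := by
  induction L with
  | nil => intro c; simp [sufAt, pvDropPre]
  | cons ch cs ih =>
    intro c
    by_cases h : pvIsLetter ch
    · cases c with
      | zero => simp [sufAt, h, dropPre_eq_sufAt_zero]
      | succ c' => simp [sufAt, h, ih c']
    · simp [sufAt, h, ih c]

lemma collect_tail_sufAt (L : List Char) : ∀ c, (pvCollect ((sufAt L c).tail)).1 = pchunk L (c + 1) := by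
  induction L with
  | nil => intro c; simp [sufAt, pvCollect, pchunk]
  | cons ch cs ih =>
    intro c
    by_cases h : pvIsLetter ch
    · cases c with
      | zero => simp [sufAt, pchunk, h, collect_fst]
      | succ c' => simp [sufAt, pchunk, h, ih c']
    · cases c with
      | zero => simp [sufAt, pchunk, h, ih 0]
      | succ c' => simp [sufAt, pchunk, h, ih (c' + 1)]

lemma goB_eq_specGo (L : List Char) :
    ∀ (s rest : List Char) (c : Nat), pvDropPre rest = sufAt L c → pvGoB rest s = specGo L s c := by
  intro s
  induction s with
  | nil => intro rest c _; simp [pvGoB, specGo]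
  | cons ch s ih =>
    intro rest c hrest
    by_cases h : pvIsLetter ch
    · have h1 : (pvCollect ((sufAt L c).tail)).1 = pchunk L (c + 1) := collect_tail_sufAt L c
      have h2 : pvDropPre ((pvCollect ((sufAt L c).tail)).2) = sufAt L (c + 1) := by
        rw [collect_snd, dropPre_dropPre, dropPre_tail_sufAt]
      simp only [pvGoB, specGo, h, if_pos, hrest]
      rw [h1, ih _ (c + 1) h2]
    · simp only [pvGoB, specGo, h]
      simp [ih rest c hrest]

-- ===== VERDICT (by name: the statement is the Claim_ definition above) =====
theorem insert_punctuation_spec : Claim_equal_insert_punctuation := by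
  intro o s _
  unfold Spec_insert_punctuation insert_punctuation insert_punctuation_alt
  have hA := goA_eq_specGo o.toList
      (pvBuildMap (pvPunctChars o.toList) o.toList 0 PySem.Dict.empty)
      (getD_buildMap o.toList) s.toList 0
  have hB := goB_eq_specGo o.toList s.toList o.toList 0 (dropPre_eq_sufAt_zero o.toList)
  have h0 : ((0 : Nat) : Int) = 0 := rfl
  rw [h0] at hA
  simp only []
  rw [hA, hB]
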